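-- pv_equiv track=rewrite | github.com/flext-sh/flext-ldif | src/flext_ldif/_utilities/dn.py | unesc
-- ===== SOURCE A (Python) =====
-- import string
--
-- def unesc(value: str) -> str:
--     r"""Unescape special characters in DN value per RFC 4514 Section 3.
--
--     RFC 4514 Unescaping Requirements:
--     =================================
--     - \\XX where XX is hex digits -> character with that code
--     - \\<special> -> the literal special character
--     - Escape sequences: \\", \\+, \\,, \\;, \\<, \\>, \\\\
--
--     Args:
--         value: The escaped DN attribute value.
--
--     Returns:
--         The unescaped value string.
--
--     """
--     if not value or "\\" not in value:
--         return value
--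
--     result: list[str] = []
--     i = 0
--     while i < len(value):
--         if value[i] == "\\" and i + 1 < len(value):
--             # Check if next two chars are hex digits
--             if i + 2 < len(value) and all(
--                 c in string.hexdigits for c in value[i + 1 : i + 3]
--             ):
--                 hex_code = value[i + 1 : i + 3]
--                 result.append(chr(int(hex_code, 16)))
--                 i += 3
--             else:
--                 result.append(value[i + 1])
--                 i += 2
--         else:
--             result.append(value[i])
--             i += 1
--
--     return "".join(result)
-- ===== SOURCE B (Python) =====
-- def unesc(value: str) -> str:
--     """Unescape RFC 4514 DN escape sequences (split-based rewrite)."""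
--     parts = value.split("\\")
--     out = [parts[0]]
--     i = 1
--     while i < len(parts):
--         p = parts[i]
--         if p == "":
--             # the separating backslash was itself escaped: "\\" -> "\"
--             if i + 1 < len(parts):
--                 out.append("\\" + parts[i + 1])
--                 i += 2
--             else:
--                 out.append("\\")  # trailing lone backslash stays literal
--                 i += 1
--         elif (
--             len(p) >= 2
--             and p[0] in "0123456789abcdefABCDEF"
--             and p[1] in "0123456789abcdefABCDEF"
--         ):
--             out.append(chr(int(p[:2], 16)) + p[2:])
--             i += 1
--         else:
--             out.append(p)
--             i += 1
--     return "".join(out)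
-- ===== Notes on version B (the rewrite author's own statement) =====
-- stated objective: alternative
-- what changed: Replaced the index-stepping while-loop over single characters by splitting the string on backslash once and decoding each backslash-prefixed segment (empty segment = escaped backslash, leading hex pair = hex escape, otherwise literal), joining the pieces at the end.
import Mathlib
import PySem

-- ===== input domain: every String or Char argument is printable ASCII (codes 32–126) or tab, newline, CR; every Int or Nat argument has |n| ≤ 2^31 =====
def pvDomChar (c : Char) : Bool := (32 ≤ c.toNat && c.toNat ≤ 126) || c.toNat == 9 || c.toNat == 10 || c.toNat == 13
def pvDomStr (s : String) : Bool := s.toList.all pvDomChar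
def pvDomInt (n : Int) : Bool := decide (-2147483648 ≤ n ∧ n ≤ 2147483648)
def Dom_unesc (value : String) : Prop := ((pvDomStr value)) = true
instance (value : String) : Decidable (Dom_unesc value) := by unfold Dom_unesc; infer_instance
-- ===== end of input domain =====

-- B unescapes by splitting on '\' once and decoding each backslash-prefixed segment,
-- instead of A's index-stepping character scan; same result, stated objective: alternative.

-- ===== PORT A =====
-- `c in string.hexdigits`
def pvIsHex (c : Char) : Bool := "0123456789abcdefABCDEF".toList.contains c

-- digit value used by `int(hex_code, 16)`
def pvHexDigitVal (c : Char) : Nat :=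
  if c.toNat ≤ 57 then c.toNat - 48
  else if c.toNat ≤ 70 then c.toNat - 55
  else c.toNat - 87

-- `chr(int(h1 ++ h2, 16))`
def pvHexChar (h1 h2 : Char) : Char :=
  Char.ofNat (16 * pvHexDigitVal h1 + pvHexDigitVal h2)

-- A's while-loop: i advances by 3 / 2 / 1; the list is the suffix value[i:]
def unescALoop : List Char → List Char
  | [] => []
  | c :: rest =>
    if c = '\\' then
      match rest with
      | h1 :: rtail =>
        match rtail with
        | h2 :: rest2 =>
          if pvIsHex h1 && pvIsHex h2 then
            pvHexChar h1 h2 :: unescALoop rest2          -- i += 3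
          else
            h1 :: unescALoop (h2 :: rest2)                -- i += 2
        | [] => h1 :: unescALoop []                       -- i+2 = len: literal, i += 2
      | [] => c :: unescALoop []                          -- i+1 = len: else-branch, i += 1
    else c :: unescALoop rest                             -- i += 1
termination_by cs => cs.length
decreasing_by all_goals (simp only [List.length_cons]; omega)

def unesc (value : String) : String :=
  if value = "" ∨ PySem.Str.isIn "\\" value = false then value
  else String.ofList (unescALoop value.toList)

-- ===== PORT B =====
-- the while-loop over parts[1:], each part preceded by a backslash in the original
def unescBParts : List (List Char) → List (List Char)
  | [] => []
  | p :: ps =>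
    if p = [] then
      match ps with
      | q :: ps2 => ('\\' :: q) :: unescBParts ps2       -- escaped backslash, i += 2
      | [] => [['\\']]                                    -- trailing lone backslash
    else
      match p with
      | a :: b :: rest =>
        if pvIsHex a && pvIsHex b then
          (pvHexChar a b :: rest) :: unescBParts ps       -- hex escape
        else p :: unescBParts ps                          -- escaped literal char
      | _ => p :: unescBParts ps                          -- escaped literal char (1-char part)

-- value.split("\\") ported as List.splitOn (Python str.split with a 1-char separator)
def unesc_alt (value : String) : String :=
  match List.splitOn '\\' value.toList with
  | p0 :: rest => String.ofList (p0 ++ (unescBParts rest).flatten)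
  | [] => value   -- unreachable: str.split never returns an empty list

-- ===== PRECONDITION & SPEC =====
def Spec_unesc (value : String) (out : String) : Prop := out = unesc_alt value
instance (value : String) (out : String) : Decidable (Spec_unesc value out) := by unfold Spec_unesc; infer_instance

-- ===== CLAIM (what is proved, stated in full; the proofs are below) =====
def Claim_equal_unesc : Prop := ∀ (value : String), Dom_unesc value → Spec_unesc value (unesc value)

-- ===== LEMMAS AND PROOFS =====

theorem pvIsHex_backslash : pvIsHex '\\' = false := by decide

-- one-step unfolding lemmas for the two loops
theorem stepA_lit (c : Char) (hc : c ≠ '\\') (rest : List Char) :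
    unescALoop (c :: rest) = c :: unescALoop rest := by
  cases rest with
  | nil => simp [unescALoop, hc]
  | cons a b => rw [unescALoop.eq_def]; simp [hc]

theorem stepA_esc_one (h1 : Char) : unescALoop ['\\', h1] = [h1] := by
  simp [unescALoop]

theorem stepA_esc_hex (h1 h2 : Char) (rest2 : List Char)
    (hx : (pvIsHex h1 && pvIsHex h2) = true) :
    unescALoop ('\\' :: h1 :: h2 :: rest2) = pvHexChar h1 h2 :: unescALoop rest2 := by
  simp [unescALoop, hx]

theorem stepA_esc_lit (h1 h2 : Char) (rest2 : List Char)
    (hx : (pvIsHex h1 && pvIsHex h2) = false) :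
    unescALoop ('\\' :: h1 :: h2 :: rest2) = h1 :: unescALoop (h2 :: rest2) := by
  simp [unescALoop, hx]

theorem stepB_empty_cons (q : List Char) (ps2 : List (List Char)) :
    unescBParts ([] :: q :: ps2) = ('\\' :: q) :: unescBParts ps2 := by
  rw [unescBParts.eq_def]; simp

theorem stepB_hex (a b : Char) (rest : List Char) (ps : List (List Char))
    (hx : (pvIsHex a && pvIsHex b) = true) :
    unescBParts ((a :: b :: rest) :: ps) = (pvHexChar a b :: rest) :: unescBParts ps := by
  rw [unescBParts.eq_def]; simp [hx]

theorem stepB_lit (a b : Char) (rest : List Char) (ps : List (List Char))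
    (hx : (pvIsHex a && pvIsHex b) = false) :
    unescBParts ((a :: b :: rest) :: ps) = (a :: b :: rest) :: unescBParts ps := by
  rw [unescBParts.eq_def]
  simp only [List.cons_ne_nil, if_false]
  simp [hx]

theorem stepB_single (a : Char) (ps : List (List Char)) :
    unescBParts ([a] :: ps) = [a] :: unescBParts ps := by
  rw [unescBParts.eq_def]
  simp only [List.cons_ne_nil, if_false]

-- joint invariant, by strong induction on length (S cs := cs.splitOnP (· == '\')):
-- L1: A's loop on cs = first part of S cs ++ decoded remaining parts
-- L2: A's loop on '\'::cs = decoded parts of S cs (each part escape-prefixed)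
theorem pv_main (n : Nat) : ∀ cs : List Char, cs.length ≤ n → ∀ q ps,
    List.splitOnP (fun c => c == '\\') cs = q :: ps →
    unescALoop cs = q ++ (unescBParts ps).flatten
    ∧ unescALoop ('\\' :: cs) = (unescBParts (q :: ps)).flatten := by
  induction n with
  | zero =>
    intro cs hcs q ps hsplit
    have hnil : cs = [] := by cases cs with
      | nil => rfl
      | cons a b => simp at hcs
    subst hnil
    rw [List.splitOnP_nil] at hsplit
    injection hsplit with hq hps
    subst hq; subst hps
    exact ⟨by simp [unescALoop, unescBParts], by simp [unescALoop, unescBParts]⟩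
  | succ n ih =>
    intro cs hcs q ps hsplit
    cases cs with
    | nil =>
      rw [List.splitOnP_nil] at hsplit
      injection hsplit with hq hps
      subst hq; subst hps
      exact ⟨by simp [unescALoop, unescBParts], by simp [unescALoop, unescBParts]⟩
    | cons c rest =>
      have hrest : rest.length ≤ n := by
        simp only [List.length_cons] at hcs; omega
      rw [List.splitOnP_cons] at hsplit
      by_cases hc : c = '\\'
      · subst hc
        rw [if_pos (by simp)] at hsplit
        injection hsplit with hq hps
        subst hq; subst hps
        obtain ⟨q', ps', hq'⟩ := List.exists_cons_of_ne_nil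
          (List.splitOnP_ne_nil (p := fun c => c == '\\') rest)
        constructor
        · -- L1 is exactly L2 at rest
          rw [hq']
          simpa using (ih rest hrest q' ps' hq').2
        · -- L2 at cs = '\'::rest : the scanned pair is '\','\' (escaped backslash)
          rw [hq']
          have hih := (ih rest hrest q' ps' hq').1
          cases rest with
          | nil =>
            rw [List.splitOnP_nil] at hq'
            injection hq' with e1 e2; subst e1; subst e2
            simp [unescALoop, unescBParts]
          | cons h2 rest2 =>
            rw [stepA_esc_lit '\\' h2 rest2 (by simp [pvIsHex_backslash]),
              stepB_empty_cons, List.flatten_cons, hih]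
            simp
      · rw [if_neg (by simpa using hc)] at hsplit
        obtain ⟨q', ps', hq'⟩ := List.exists_cons_of_ne_nil
          (List.splitOnP_ne_nil (p := fun c => c == '\\') rest)
        rw [hq'] at hsplit
        simp only [List.modifyHead] at hsplit
        injection hsplit with hq hps
        subst hq; subst hps
        have hih1 := (ih rest hrest q' ps' hq').1
        constructor
        · -- L1: literal character before the next backslash
          rw [stepA_lit c hc rest, hih1]
          simp
        · -- L2: the scanned pair is '\',c
          cases rest with
          | nil =>
            rw [List.splitOnP_nil] at hq'
            injection hq' with e1 e2; subst e1; subst e2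
            rw [stepA_esc_one]
            simp [unescBParts]
          | cons h2 rest2 =>
            have hrest2 : rest2.length ≤ n := by
              simp only [List.length_cons] at hcs; omega
            rw [List.splitOnP_cons] at hq'
            by_cases hh2 : h2 = '\\'
            · subst hh2
              rw [if_pos (by simp)] at hq'
              injection hq' with e1 e2; subst e1; subst e2
              obtain ⟨q2, ps2, hq2⟩ := List.exists_cons_of_ne_nil
                (List.splitOnP_ne_nil (p := fun c => c == '\\') rest2)
              have hih2 := (ih rest2 hrest2 q2 ps2 hq2).2
              rw [hq2]
              rw [stepA_esc_lit c '\\' rest2 (by simp [pvIsHex_backslash]),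
                stepB_single, List.flatten_cons]
              simp [hih2]
            · rw [if_neg (by simpa using hh2)] at hq'
              obtain ⟨q2, ps2, hq2⟩ := List.exists_cons_of_ne_nil
                (List.splitOnP_ne_nil (p := fun c => c == '\\') rest2)
              rw [hq2] at hq'
              simp only [List.modifyHead] at hq'
              injection hq' with e1 e2; subst e1; subst e2
              have hih2 := (ih rest2 hrest2 q2 ps2 hq2).1
              by_cases hx : (pvIsHex c && pvIsHex h2) = true
              · rw [stepA_esc_hex c h2 rest2 hx, stepB_hex c h2 q2 ps2 hx,
                  List.flatten_cons, hih2]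
                simp
              · have hx' : (pvIsHex c && pvIsHex h2) = false := by simpa using hx
                rw [stepA_esc_lit c h2 rest2 hx', stepB_lit c h2 q2 ps2 hx',
                  List.flatten_cons, hih1]
                simp

theorem unescALoop_no_backslash : ∀ cs : List Char, '\\' ∉ cs → unescALoop cs = cs := by
  intro cs
  induction cs with
  | nil => intro _; simp [unescALoop]
  | cons c rest ih =>
    intro h
    have hc : c ≠ '\\' := fun hc => h (hc ▸ List.mem_cons_self ..)
    have hr : '\\' ∉ rest := fun hm => h (List.mem_cons_of_mem _ hm)
    rw [stepA_lit c hc rest, ih hr]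

theorem unesc_alt_eq (value : String) :
    unesc_alt value = String.ofList (unescALoop value.toList) := by
  unfold unesc_alt
  obtain ⟨q, ps, hq⟩ := List.exists_cons_of_ne_nil
    (List.splitOnP_ne_nil (p := fun c => c == '\\') value.toList)
  have hsplit : List.splitOn '\\' value.toList = q :: ps := by
    simpa [List.splitOn] using hq
  rw [hsplit]
  rw [(pv_main value.toList.length value.toList le_rfl q ps hq).1]

-- ===== VERDICT (by name: the statement is the Claim_ definition above) =====
theorem unesc_spec : Claim_equal_unesc := by
  intro value _
  unfold Spec_unesc
  rw [unesc_alt_eq]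
  unfold unesc
  split_ifs with h
  · rcases h with h | h
    · subst h
      simp [unescALoop]
    · have hmem : '\\' ∉ value.toList := by
        have h2 : PySem.Chars.isIn ['\\'] value.toList = false := by
          simpa using h
        rw [PySem.Chars.isIn_eq_false_iff] at h2
        intro hm
        exact h2 ((List.singleton_infix_iff _ _).mpr hm)
      rw [unescALoop_no_backslash _ hmem, String.ofList_toList]
  · rfl
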